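-- pv_equiv track=rewrite | github.com/runstr/AdventOfCode | y2020/Day20/day20_1.py | match_values
-- ===== SOURCE A (Python) =====
-- def match_values(line, values):
--     line1 = (values[0], False, (1,0))
--     line2 = (line1[0][::-1], True, (1,0))
--     line3 = (values[len(values) -1], False, (-1,0))
--     line4 = (line3[0][::-1], True, (-1,0))
--     line5 = ("".join([a[0] for a in values]), False, (0, -1))
--     line6 = (line5[0][::-1], True, (0, -1))
--     line7 = ("".join([a[len(a)-1] for a in values]), False, (0,1))
--     line8 = (line7[0][::-1], True, (0, 1))
--     test_lines = [line1, line2, line3, line4, line5, line6, line7, line8]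
--     for test, flipped, dir in test_lines:
--         if test == line:
--             return 1
--
--     return 0
-- ===== SOURCE B (Python) =====
-- def match_values(line, values):
--     m = len(line)
--
--     def matches(length, get):
--         # does line equal this border read forwards, or read backwards?
--         if m != length:
--             return False
--         fwd = True
--         bwd = True
--         for i in range(m):
--             c = get(i)
--             if line[i] != c:
--                 fwd = False
--             if line[m - 1 - i] != c:
--                 bwd = False
--         return fwd or bwd
--
--     n = len(values)
--     top = values[0]
--     bottom = values[n - 1]
--     firsts = [a[0] for a in values]
--     lasts = [a[len(a) - 1] for a in values]
--     if matches(len(top), lambda i: top[i]):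
--         return 1
--     if matches(len(bottom), lambda i: bottom[i]):
--         return 1
--     if matches(n, lambda i: firsts[i]):
--         return 1
--     if matches(n, lambda i: lasts[i]):
--         return 1
--     return 0
-- ===== Notes on version B (the rewrite author's own statement) =====
-- stated objective: alternative
-- what changed: B builds no border strings: it extracts the per-row first/last characters once and, for each of the four physical borders, does one character scan through an index accessor maintaining forward and backward match flags, whereas A materialises eight oriented border strings and compares each whole string to line.
import Mathlib
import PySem

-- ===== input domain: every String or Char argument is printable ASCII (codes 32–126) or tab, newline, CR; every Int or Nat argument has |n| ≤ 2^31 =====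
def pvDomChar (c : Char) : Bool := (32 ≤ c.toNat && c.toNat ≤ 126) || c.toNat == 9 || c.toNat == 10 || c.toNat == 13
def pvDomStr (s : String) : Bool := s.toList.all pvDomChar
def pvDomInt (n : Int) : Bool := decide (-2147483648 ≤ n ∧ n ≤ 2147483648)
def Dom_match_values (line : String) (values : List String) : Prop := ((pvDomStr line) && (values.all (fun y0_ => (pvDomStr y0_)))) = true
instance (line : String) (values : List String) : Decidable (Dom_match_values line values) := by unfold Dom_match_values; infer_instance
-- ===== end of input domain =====

-- B builds no border strings: it scans each of the four physical borders once through an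
-- index accessor, tracking forward and backward match flags, instead of materialising
-- eight oriented strings (objective: alternative; same cost).

-- ===== PORT A =====
-- s[::-1]
def pvStrRev (s : String) : String := String.ofList s.toList.reverse
-- values[0] / values[len(values)-1] / a[0] / a[len(a)-1]; the defaults are unreachable under Pre_
def pvFirstStr (values : List String) : String := values.headD ""
def pvLastStr (values : List String) : String := values.getLastD ""
def pvFirstChar (a : String) : Char := a.toList.headD ' '
def pvLastChar (a : String) : Char := a.toList.getLastD ' '
-- the 'for test, flipped, dir in test_lines' loop
def pvLoopA : List (String × Bool × (Int × Int)) → String → Int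
  | [], _ => 0
  | (test, _, _) :: rest, line => if test == line then 1 else pvLoopA rest line

def match_values (line : String) (values : List String) : Int :=
  let line1 : String × Bool × (Int × Int) := (pvFirstStr values, false, (1, 0))
  let line2 : String × Bool × (Int × Int) := (pvStrRev line1.1, true, (1, 0))
  let line3 : String × Bool × (Int × Int) := (pvLastStr values, false, (-1, 0))
  let line4 : String × Bool × (Int × Int) := (pvStrRev line3.1, true, (-1, 0))
  let line5 : String × Bool × (Int × Int) := (String.ofList (values.map pvFirstChar), false, (0, -1))
  let line6 : String × Bool × (Int × Int) := (pvStrRev line5.1, true, (0, -1))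
  let line7 : String × Bool × (Int × Int) := (String.ofList (values.map pvLastChar), false, (0, 1))
  let line8 : String × Bool × (Int × Int) := (pvStrRev line7.1, true, (0, 1))
  pvLoopA [line1, line2, line3, line4, line5, line6, line7, line8] line

-- ===== PORT B =====
-- the 'for i in range(m)' loop of B's helper: fwd/bwd flags over one scan of the border accessor
def pvScanPair (L : List Char) (m : Nat) (get : Nat → Char) : Bool × Bool :=
  (List.range m).foldl
    (fun (p : Bool × Bool) i =>
      let c := get i
      (p.1 && (L.getD i ' ' == c), p.2 && (L.getD (m - 1 - i) ' ' == c)))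
    (true, true)

-- B's helper 'matches(length, get)'
def pvMatches (L : List Char) (m len : Nat) (get : Nat → Char) : Bool :=
  if m ≠ len then false
  else
    let p := pvScanPair L m get
    p.1 || p.2

def match_values_alt (line : String) (values : List String) : Int :=
  let L := line.toList
  let m := L.length
  let n := values.length
  let top := pvFirstStr values
  let bottom := pvLastStr values
  let firsts := values.map pvFirstChar
  let lasts := values.map pvLastChar
  if pvMatches L m top.toList.length (fun i => top.toList.getD i ' ') then 1
  else if pvMatches L m bottom.toList.length (fun i => bottom.toList.getD i ' ') then 1
  else if pvMatches L m n (fun i => firsts.getD i ' ') then 1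
  else if pvMatches L m n (fun i => lasts.getD i ' ') then 1
  else 0

-- ===== PRECONDITION & SPEC =====
-- Pre_ excludes exactly the inputs where the Python A raises IndexError:
-- an empty values list (values[0]) or an empty string element (a[0]).
def Pre_match_values (line : String) (values : List String) : Prop :=
  values ≠ [] ∧ ∀ s ∈ values, s ≠ ""
instance (line : String) (values : List String) : Decidable (Pre_match_values line values) := by
  unfold Pre_match_values; infer_instance
def pvWitness_match_values : String × List String := ("ab", ["ab", "cd"])
def Spec_match_values (line : String) (values : List String) (out : Int) : Prop := out = match_values_alt line values
instance (line : String) (values : List String) (out : Int) : Decidable (Spec_match_values line values out) := by unfold Spec_match_values; infer_instance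

-- ===== CLAIM (what is proved, stated in full; the proofs are below) =====
def Claim_equal_match_values : Prop := ∀ (line : String) (values : List String), Dom_match_values line values → Pre_match_values line values → Spec_match_values line values (match_values line values)

-- ===== LEMMAS AND PROOFS =====

theorem pvStrRev_rev (s : String) : pvStrRev (pvStrRev s) = s := by
  simp [pvStrRev]

theorem beq_rev (t line : String) : (pvStrRev t == line) = (t == pvStrRev line) := by
  by_cases h : pvStrRev t = line
  · subst h; simp [pvStrRev_rev]
  · have h' : t ≠ pvStrRev line := by
      intro he; exact h (by rw [he, pvStrRev_rev])
    simp [h, h']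

theorem loopA_pair (t : String) (f f' : Bool) (d d' : Int × Int)
    (rest : List (String × Bool × (Int × Int))) (line : String) :
    pvLoopA ((t, f, d) :: (pvStrRev t, f', d') :: rest) line =
      if t == line || t == pvStrRev line then 1 else pvLoopA rest line := by
  by_cases h1 : (t == line) = true
  · simp [pvLoopA, h1]
  · by_cases h2 : (t == pvStrRev line) = true
    · simp [pvLoopA, h1, beq_rev, h2]
    · simp [pvLoopA, h1, beq_rev, h2]

theorem all_congr_mem {α : Type} (l : List α) (f g : α → Bool)
    (h : ∀ i ∈ l, f i = g i) : l.all f = l.all g := by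
  induction l with
  | nil => rfl
  | cons x xs ih =>
    simp only [List.all_cons, h x (by simp)]
    rw [ih (fun i hi => h i (by simp [hi]))]

theorem foldl_pair (l : List Nat) (a b : Bool) (f g : Nat → Bool) :
    l.foldl (fun (p : Bool × Bool) i => (p.1 && f i, p.2 && g i)) (a, b)
      = (a && l.all f, b && l.all g) := by
  induction l generalizing a b with
  | nil => simp
  | cons x xs ih => simp [List.foldl_cons, ih, Bool.and_assoc]

theorem scanPair_eq (L : List Char) (m : Nat) (get : Nat → Char) :
    pvScanPair L m get
      = ((List.range m).all (fun i => L.getD i ' ' == get i),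
         (List.range m).all (fun i => L.getD (m - 1 - i) ' ' == get i)) := by
  simpa using foldl_pair (List.range m)
    true true (fun i => L.getD i ' ' == get i) (fun i => L.getD (m - 1 - i) ' ' == get i)

-- forward scan = list equality (given equal lengths)
theorem all_fwd_eq (L t : List Char) (h : L.length = t.length) :
    ((List.range L.length).all (fun i => L.getD i ' ' == t.getD i ' ')) = decide (L = t) := by
  rw [Bool.eq_iff_iff, decide_eq_true_iff, List.all_eq_true]
  constructor
  · intro hall
    apply List.ext_getElem h
    intro i h1 h2
    have := hall i (List.mem_range.mpr h1)
    rw [List.getD_eq_getElem L ' ' h1, List.getD_eq_getElem t ' ' h2] at this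
    simpa using this
  · intro he i hi; subst he; simp

-- backward scan on L = forward scan on L.reverse
theorem all_bwd_eq (L t : List Char) (h : L.length = t.length) :
    ((List.range L.length).all (fun i => L.getD (L.length - 1 - i) ' ' == t.getD i ' '))
      = decide (L.reverse = t) := by
  have hr : ∀ i ∈ List.range L.length,
      (L.getD (L.length - 1 - i) ' ' == t.getD i ' ')
        = (L.reverse.getD i ' ' == t.getD i ' ') := by
    intro i hi
    rw [List.mem_range] at hi
    have h1 : L.length - 1 - i < L.length := by omega
    rw [List.getD_eq_getElem L ' ' h1,
        List.getD_eq_getElem L.reverse ' ' (by simpa using hi),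
        List.getElem_reverse]
  rw [all_congr_mem _ _ _ hr]
  have := all_fwd_eq L.reverse t (by simpa using h)
  simpa using this

theorem pvMatches_eq (L t : List Char) (get : Nat → Char)
    (hget : ∀ i, i < t.length → get i = t.getD i ' ') :
    pvMatches L L.length t.length get = (decide (L = t) || decide (L.reverse = t)) := by
  by_cases h : L.length = t.length
  · unfold pvMatches
    rw [if_neg (fun hn => hn h), scanPair_eq]
    have hgF : ∀ i ∈ List.range L.length,
        (L.getD i ' ' == get i) = (L.getD i ' ' == t.getD i ' ') := by
      intro i hi; rw [List.mem_range] at hi; rw [hget i (by omega)]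
    have hgB : ∀ i ∈ List.range L.length,
        (L.getD (L.length - 1 - i) ' ' == get i)
          = (L.getD (L.length - 1 - i) ' ' == t.getD i ' ') := by
      intro i hi; rw [List.mem_range] at hi; rw [hget i (by omega)]
    show ((List.range L.length).all _ || (List.range L.length).all _) = _
    rw [all_congr_mem _ _ _ hgF, all_congr_mem _ _ _ hgB, all_fwd_eq L t h, all_bwd_eq L t h]
  · have h1 : L ≠ t := fun he => h (by rw [he])
    have h2 : L.reverse ≠ t := fun he => h (by rw [← he]; simp)
    simp [pvMatches, h, h1, h2]

-- a string == comparison, reduced to the toList comparison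
theorem str_beq_toList (s t : String) : (s == t) = decide (s.toList = t.toList) := by
  by_cases h : s = t
  · subst h; simp
  · have h' : s.toList ≠ t.toList := fun he => h (by
      have := congrArg String.ofList he; simpa using this)
    simp [h, h']

-- one border check of B = the corresponding pair of comparisons in A
theorem border_check (line : String) (t : List Char) :
    pvMatches line.toList line.toList.length t.length (fun i => t.getD i ' ')
      = ((String.ofList t == line) || (String.ofList t == pvStrRev line)) := by
  rw [pvMatches_eq line.toList t _ (fun i _ => rfl),
      str_beq_toList (String.ofList t) line, str_beq_toList (String.ofList t) (pvStrRev line)]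
  simp only [pvStrRev, String.toList_ofList]
  rw [Bool.eq_iff_iff]
  simp only [Bool.or_eq_true, decide_eq_true_eq]
  constructor
  all_goals rintro (he | he)
  · exact Or.inl he.symm
  · exact Or.inr he.symm
  · exact Or.inl he.symm
  · exact Or.inr he.symm

-- B's column check against a mapped per-row character list
theorem border_check_map (line : String) (values : List String) (f : String → Char) :
    pvMatches line.toList line.toList.length values.length (fun i => (values.map f).getD i ' ')
      = ((String.ofList (values.map f) == line) || (String.ofList (values.map f) == pvStrRev line)) := by
  rw [show values.length = (values.map f).length by simp]
  exact border_check line (values.map f)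

-- ===== VERDICT (by name: the statement is the Claim_ definition above) =====
theorem match_values_spec : Claim_equal_match_values := by
  intro line values _ _
  show match_values line values = match_values_alt line values
  simp only [match_values, match_values_alt, loopA_pair]
  rw [border_check line (pvFirstStr values).toList,
      border_check line (pvLastStr values).toList,
      border_check_map line values pvFirstChar,
      border_check_map line values pvLastChar]
  simp [pvLoopA]
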